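-- pv_equiv track=rewrite | github.com/gh0stintheshe11/LeetCode-Solutions | solutions/3269.constructing-two-increasing-arrays/Python3.py | minLargest
-- ===== SOURCE A (Python) =====
-- def minLargest(nums1, nums2):
--     from itertools import product
--     from math import inf
--
--     incr = lambda x, y: x + 1 + (x % 2 == y % 2)
--
--     n1, n2 = len(nums1), len(nums2)
--     dp = [[inf] * (n2 + 1) for _ in range(n1 + 1)]
--
--     dp[0][0] = 0
--     for i in range(1, n1 + 1):
--         dp[i][0] = incr(dp[i - 1][0], nums1[i - 1])
--     for j in range(1, n2 + 1):
--         dp[0][j] = incr(dp[0][j - 1], nums2[j - 1])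
--
--     for i, j in product(range(1, n1 + 1), range(1, n2 + 1)):
--         dp[i][j] = min(incr(dp[i - 1][j], nums1[i - 1]),
--                        incr(dp[i][j - 1], nums2[j - 1]))
--
--     return dp[n1][n2]
-- ===== SOURCE B (Python) =====
-- def minLargest(nums1, nums2):
--     # Top-down memoized recursion: solve(i, j) = minimal largest value after
--     # placing the first i elements of nums1 and the first j of nums2, computed
--     # on demand with lru_cache instead of filling a bottom-up table.
--     from functools import lru_cache
--
--     incr = lambda x, y: x + 1 + (x % 2 == y % 2)
--
--     @lru_cache(maxsize=None)
--     def solve(i, j):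
--         if i == 0 and j == 0:
--             return 0
--         if i == 0:
--             return incr(solve(0, j - 1), nums2[j - 1])
--         if j == 0:
--             return incr(solve(i - 1, 0), nums1[i - 1])
--         return min(incr(solve(i - 1, j), nums1[i - 1]),
--                    incr(solve(i, j - 1), nums2[j - 1]))
--
--     return solve(len(nums1), len(nums2))
-- ===== Notes on version B (the rewrite author's own statement) =====
-- stated objective: alternative
-- what changed: B replaces A's bottom-up table construction (pre-filled inf table, two edge loops, then a product loop over all cells) by a top-down memoized recursion solve(i,j) with functools.lru_cache that computes only the states reachable from the goal, on demand.
import Mathlib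
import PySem

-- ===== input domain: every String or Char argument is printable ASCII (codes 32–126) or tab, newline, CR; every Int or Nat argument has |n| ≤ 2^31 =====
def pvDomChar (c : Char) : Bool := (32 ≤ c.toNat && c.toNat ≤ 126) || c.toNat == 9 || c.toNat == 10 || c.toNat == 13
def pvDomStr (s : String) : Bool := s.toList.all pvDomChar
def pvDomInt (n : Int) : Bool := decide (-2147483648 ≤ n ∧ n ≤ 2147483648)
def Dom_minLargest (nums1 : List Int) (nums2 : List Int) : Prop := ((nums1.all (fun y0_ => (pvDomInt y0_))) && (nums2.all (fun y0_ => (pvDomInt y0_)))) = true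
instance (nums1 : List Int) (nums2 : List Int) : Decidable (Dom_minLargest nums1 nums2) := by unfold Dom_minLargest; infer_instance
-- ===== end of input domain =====

-- B replaces A's bottom-up (n1+1)×(n2+1) table (edge loops + product loop) by a
-- top-down memoized recursion computed on demand (objective: alternative; same values).

-- incr lambda shared by both Pythons: x + 1 + (x % 2 == y % 2)
def pvIncr (x y : Int) : Int := x + 1 + (if PySem.Int.mod x 2 = PySem.Int.mod y 2 then 1 else 0)

-- ===== PORT A =====
-- A's 2-D list dp: entry read dp[i][j] and assignment dp[i][j] = v
def pvAt (dp : List (List Int)) (i j : Nat) : Int := (dp.getD i []).getD j 0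
def pvSet (dp : List (List Int)) (i j : Nat) (v : Int) : List (List Int) :=
  dp.set i ((dp.getD i []).set j v)

def pvRowStep (nums1 : List Int) (dp : List (List Int)) (k : Nat) : List (List Int) :=
  pvSet dp (k + 1) 0 (pvIncr (pvAt dp k 0) (nums1.getD k 0))

def pvColStep (nums2 : List Int) (dp : List (List Int)) (k : Nat) : List (List Int) :=
  pvSet dp 0 (k + 1) (pvIncr (pvAt dp 0 k) (nums2.getD k 0))

def pvCellStep (nums1 nums2 : List Int) (i : Nat) (dp : List (List Int)) (j : Nat) : List (List Int) :=
  pvSet dp (i + 1) (j + 1) (min (pvIncr (pvAt dp i (j + 1)) (nums1.getD i 0))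
                                (pvIncr (pvAt dp (i + 1) j) (nums2.getD j 0)))

def minLargest (nums1 : List Int) (nums2 : List Int) : Int :=
  let n1 := nums1.length
  let n2 := nums2.length
  let dp0 : List (List Int) := List.replicate (n1 + 1) (List.replicate (n2 + 1) 4611686018427387904)
  let dp1 := pvSet dp0 0 0 0
  let dp2 := (List.range n1).foldl (pvRowStep nums1) dp1
  let dp3 := (List.range n2).foldl (pvColStep nums2) dp2
  let dp4 := (List.range n1).foldl (fun d i => (List.range n2).foldl (pvCellStep nums1 nums2 i) d) dp3
  pvAt dp4 n1 n2

-- ===== PORT B =====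
-- B's recursive helper solve(i, j), branches in B's order; the lru_cache memo is a
-- pure caching mechanism and is ported as the recursion itself
def pvSolve (nums1 nums2 : List Int) : Nat → Nat → Int
  | 0, 0 => 0
  | 0, j + 1 => pvIncr (pvSolve nums1 nums2 0 j) (nums2.getD j 0)
  | i + 1, 0 => pvIncr (pvSolve nums1 nums2 i 0) (nums1.getD i 0)
  | i + 1, j + 1 => min (pvIncr (pvSolve nums1 nums2 i (j + 1)) (nums1.getD i 0))
                        (pvIncr (pvSolve nums1 nums2 (i + 1) j) (nums2.getD j 0))
  termination_by i j => i + j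

def minLargest_alt (nums1 : List Int) (nums2 : List Int) : Int :=
  pvSolve nums1 nums2 nums1.length nums2.length

-- ===== PRECONDITION & SPEC =====
def Spec_minLargest (nums1 : List Int) (nums2 : List Int) (out : Int) : Prop := out = minLargest_alt nums1 nums2
instance (nums1 : List Int) (nums2 : List Int) (out : Int) : Decidable (Spec_minLargest nums1 nums2 out) := by unfold Spec_minLargest; infer_instance

-- ===== CLAIM (what is proved, stated in full; the proofs are below) =====
def Claim_equal_minLargest : Prop := ∀ (nums1 : List Int) (nums2 : List Int), Dom_minLargest nums1 nums2 → Spec_minLargest nums1 nums2 (minLargest nums1 nums2)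

-- ===== LEMMAS AND PROOFS =====

theorem pvGetD_set {α : Type} (l : List α) (a i : Nat) (x d : α) :
    (l.set a x).getD i d = if a = i ∧ a < l.length then x else l.getD i d := by
  simp only [List.getD_eq_getElem?_getD, List.getElem?_set]
  split_ifs with h1 h2 h3 <;> simp_all
  omega

theorem pvSet_length (dp : List (List Int)) (a b : Nat) (v : Int) :
    (pvSet dp a b v).length = dp.length := by
  simp [pvSet]

theorem pvSet_rowlen (dp : List (List Int)) (a b : Nat) (v : Int) (i : Nat) :
    ((pvSet dp a b v).getD i []).length = ((dp.getD i []).length) := by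
  unfold pvSet
  rw [pvGetD_set]
  split_ifs with h
  · rw [← h.1, List.length_set]
  · rfl

theorem pvAt_set_eq (dp : List (List Int)) (a b : Nat) (v : Int)
    (ha : a < dp.length) (hb : b < (dp.getD a []).length) :
    pvAt (pvSet dp a b v) a b = v := by
  unfold pvAt pvSet
  rw [pvGetD_set, if_pos ⟨rfl, ha⟩, pvGetD_set, if_pos ⟨rfl, hb⟩]

theorem pvAt_set_ne (dp : List (List Int)) (a b : Nat) (v : Int) (i j : Nat)
    (h : ¬(i = a ∧ j = b)) :
    pvAt (pvSet dp a b v) i j = pvAt dp i j := by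
  unfold pvAt pvSet
  rw [pvGetD_set]
  split_ifs with h1
  · obtain ⟨rfl, _⟩ := h1
    rw [pvGetD_set, if_neg (by omega)]
  · rfl

theorem rowA (nums1 nums2 : List Int) (dp0 : List (List Int))
    (h0 : pvAt dp0 0 0 = 0)
    (hL : nums1.length < dp0.length)
    (hR : ∀ i, i < dp0.length → 0 < (dp0.getD i []).length)
    (m : Nat) (hm : m ≤ nums1.length) :
    ((List.range m).foldl (pvRowStep nums1) dp0).length = dp0.length ∧
    (∀ i, (((List.range m).foldl (pvRowStep nums1) dp0).getD i []).length = (dp0.getD i []).length) ∧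
    (∀ i, i ≤ m → pvAt ((List.range m).foldl (pvRowStep nums1) dp0) i 0 = pvSolve nums1 nums2 i 0) ∧
    (∀ i j, 1 ≤ j → pvAt ((List.range m).foldl (pvRowStep nums1) dp0) i j = pvAt dp0 i j) := by
  induction m with
  | zero =>
      refine ⟨rfl, fun _ => rfl, ?_, fun _ _ _ => rfl⟩
      intro i hi
      obtain rfl : i = 0 := Nat.le_zero.mp hi
      simpa [pvSolve] using h0
  | succ m ih =>
      obtain ⟨ihL, ihR, ihv, ihu⟩ := ih (by omega)
      rw [List.range_succ, List.foldl_append]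
      simp only [List.foldl_cons, List.foldl_nil]
      have hwL : m + 1 < ((List.range m).foldl (pvRowStep nums1) dp0).length := by omega
      have hwR : 0 < (((List.range m).foldl (pvRowStep nums1) dp0).getD (m + 1) []).length := by
        rw [ihR]; exact hR _ (by omega)
      refine ⟨?_, ?_, ?_, ?_⟩
      · rw [pvRowStep, pvSet_length, ihL]
      · intro i; rw [pvRowStep, pvSet_rowlen, ihR]
      · intro i hi
        by_cases hieq : i = m + 1
        · subst hieq
          rw [pvRowStep, pvAt_set_eq _ _ _ _ hwL hwR, ihv m le_rfl]
          simp [pvSolve]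
        · rw [pvRowStep, pvAt_set_ne _ _ _ _ _ _ (by omega)]
          exact ihv i (by omega)
      · intro i j hj
        rw [pvRowStep, pvAt_set_ne _ _ _ _ _ _ (by omega)]
        exact ihu i j hj

theorem colA (nums1 nums2 : List Int) (dp0 : List (List Int))
    (h0 : pvAt dp0 0 0 = pvSolve nums1 nums2 0 0)
    (hL : 0 < dp0.length)
    (hR : ∀ i, i < dp0.length → nums2.length < (dp0.getD i []).length)
    (m : Nat) (hm : m ≤ nums2.length) :
    ((List.range m).foldl (pvColStep nums2) dp0).length = dp0.length ∧
    (∀ i, (((List.range m).foldl (pvColStep nums2) dp0).getD i []).length = (dp0.getD i []).length) ∧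
    (∀ j, j ≤ m → pvAt ((List.range m).foldl (pvColStep nums2) dp0) 0 j = pvSolve nums1 nums2 0 j) ∧
    (∀ i j, 1 ≤ i → pvAt ((List.range m).foldl (pvColStep nums2) dp0) i j = pvAt dp0 i j) ∧
    (∀ i, pvAt ((List.range m).foldl (pvColStep nums2) dp0) i 0 = pvAt dp0 i 0) := by
  induction m with
  | zero =>
      refine ⟨rfl, fun _ => rfl, ?_, fun _ _ _ => rfl, fun _ => rfl⟩
      intro j hj
      obtain rfl : j = 0 := Nat.le_zero.mp hj
      exact h0
  | succ m ih =>
      obtain ⟨ihL, ihR, ihv, ihu, ihz⟩ := ih (by omega)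
      rw [List.range_succ, List.foldl_append]
      simp only [List.foldl_cons, List.foldl_nil]
      have hwL : 0 < ((List.range m).foldl (pvColStep nums2) dp0).length := by omega
      have hwR : m + 1 < (((List.range m).foldl (pvColStep nums2) dp0).getD 0 []).length := by
        rw [ihR]; exact lt_of_le_of_lt (by omega) (hR 0 hL)
      refine ⟨?_, ?_, ?_, ?_, ?_⟩
      · rw [pvColStep, pvSet_length, ihL]
      · intro i; rw [pvColStep, pvSet_rowlen, ihR]
      · intro j hj
        by_cases hjeq : j = m + 1
        · subst hjeq
          rw [pvColStep, pvAt_set_eq _ _ _ _ hwL hwR, ihv m le_rfl]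
          simp [pvSolve]
        · rw [pvColStep, pvAt_set_ne _ _ _ _ _ _ (by omega)]
          exact ihv j (by omega)
      · intro i j hi
        rw [pvColStep, pvAt_set_ne _ _ _ _ _ _ (by omega)]
        exact ihu i j hi
      · intro i
        rw [pvColStep, pvAt_set_ne _ _ _ _ _ _ (by omega)]
        exact ihz i

theorem cellA (nums1 nums2 : List Int) (i : Nat) (hi : i < nums1.length)
    (dp0 : List (List Int))
    (hL : nums1.length < dp0.length)
    (hR : ∀ a, a < dp0.length → nums2.length < (dp0.getD a []).length)
    (H : ∀ a b, a ≤ nums1.length → b ≤ nums2.length → (a = 0 ∨ b = 0 ∨ a ≤ i) →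
      pvAt dp0 a b = pvSolve nums1 nums2 a b) :
    ∀ m, m ≤ nums2.length →
      ((List.range m).foldl (pvCellStep nums1 nums2 i) dp0).length = dp0.length ∧
      (∀ a, (((List.range m).foldl (pvCellStep nums1 nums2 i) dp0).getD a []).length = (dp0.getD a []).length) ∧
      (∀ a b, a ≤ nums1.length → b ≤ nums2.length →
        (a = 0 ∨ b = 0 ∨ a ≤ i ∨ (a = i + 1 ∧ b ≤ m)) →
        pvAt ((List.range m).foldl (pvCellStep nums1 nums2 i) dp0) a b = pvSolve nums1 nums2 a b) := by
  intro m
  induction m with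
  | zero =>
      intro _
      refine ⟨rfl, fun _ => rfl, ?_⟩
      intro a b ha hb hcond
      exact H a b ha hb (by omega)
  | succ m ih =>
      intro hm
      obtain ⟨ihL, ihR, ihv⟩ := ih (by omega)
      rw [List.range_succ, List.foldl_append]
      simp only [List.foldl_cons, List.foldl_nil]
      have hwL : i + 1 < ((List.range m).foldl (pvCellStep nums1 nums2 i) dp0).length := by omega
      have hwR : m + 1 < (((List.range m).foldl (pvCellStep nums1 nums2 i) dp0).getD (i + 1) []).length := by
        rw [ihR]; exact lt_of_le_of_lt (by omega) (hR _ (by omega))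
      refine ⟨?_, ?_, ?_⟩
      · rw [pvCellStep, pvSet_length, ihL]
      · intro a; rw [pvCellStep, pvSet_rowlen, ihR]
      · intro a b ha hb hcond
        by_cases hab : a = i + 1 ∧ b = m + 1
        · obtain ⟨rfl, rfl⟩ := hab
          rw [pvCellStep, pvAt_set_eq _ _ _ _ hwL hwR,
            ihv i (m + 1) (by omega) (by omega) (by omega),
            ihv (i + 1) m (by omega) (by omega) (by omega)]
          simp [pvSolve]
        · rw [pvCellStep, pvAt_set_ne _ _ _ _ _ _ hab]
          exact ihv a b ha hb (by omega)

theorem mainA (nums1 nums2 : List Int) (dp0 : List (List Int))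
    (hL : nums1.length < dp0.length)
    (hR : ∀ a, a < dp0.length → nums2.length < (dp0.getD a []).length)
    (H : ∀ a b, a ≤ nums1.length → b ≤ nums2.length → (a = 0 ∨ b = 0) →
      pvAt dp0 a b = pvSolve nums1 nums2 a b) :
    ∀ m, m ≤ nums1.length →
      ((List.range m).foldl (fun d i => (List.range nums2.length).foldl (pvCellStep nums1 nums2 i) d) dp0).length = dp0.length ∧
      (∀ a, (((List.range m).foldl (fun d i => (List.range nums2.length).foldl (pvCellStep nums1 nums2 i) d) dp0).getD a []).length = (dp0.getD a []).length) ∧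
      (∀ a b, a ≤ nums1.length → b ≤ nums2.length → (a = 0 ∨ b = 0 ∨ a ≤ m) →
        pvAt ((List.range m).foldl (fun d i => (List.range nums2.length).foldl (pvCellStep nums1 nums2 i) d) dp0) a b
          = pvSolve nums1 nums2 a b) := by
  intro m
  induction m with
  | zero =>
      intro _
      refine ⟨rfl, fun _ => rfl, ?_⟩
      intro a b ha hb hcond
      exact H a b ha hb (by omega)
  | succ m ih =>
      intro hm
      obtain ⟨ihL, ihR, ihv⟩ := ih (by omega)
      rw [List.range_succ, List.foldl_append]
      simp only [List.foldl_cons, List.foldl_nil]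
      obtain ⟨cL, cR, cv⟩ := cellA nums1 nums2 m (by omega) _
        (by omega) (fun a ha => by rw [ihR]; exact hR a (by omega))
        (fun a b ha hb hc => ihv a b ha hb (by omega)) nums2.length le_rfl
      refine ⟨by omega, ?_, ?_⟩
      · intro a; rw [cR, ihR]
      · intro a b ha hb hcond
        rw [cv a b ha hb (by omega)]

theorem minLargest_eq_pvSolve (nums1 nums2 : List Int) :
    minLargest nums1 nums2 = pvSolve nums1 nums2 nums1.length nums2.length := by
  show pvAt ((List.range nums1.length).foldl
      (fun d i => (List.range nums2.length).foldl (pvCellStep nums1 nums2 i) d)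
      ((List.range nums2.length).foldl (pvColStep nums2)
        ((List.range nums1.length).foldl (pvRowStep nums1)
          (pvSet (List.replicate (nums1.length + 1) (List.replicate (nums2.length + 1) 4611686018427387904)) 0 0 0))))
      nums1.length nums2.length
    = pvSolve nums1 nums2 nums1.length nums2.length
  set dp0 := List.replicate (nums1.length + 1) (List.replicate (nums2.length + 1) (4611686018427387904 : Int)) with hdp0
  have hdL : dp0.length = nums1.length + 1 := by simp [hdp0]
  have hdR : ∀ a, a < dp0.length → (dp0.getD a []).length = nums2.length + 1 := by
    intro a ha
    rw [hdL] at ha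
    simp [hdp0, List.getD_eq_getElem?_getD, ha]
  have h1L : (pvSet dp0 0 0 0).length = dp0.length := pvSet_length _ _ _ _
  have h1R : ∀ a, ((pvSet dp0 0 0 0).getD a []).length = (dp0.getD a []).length :=
    fun a => pvSet_rowlen _ _ _ _ _
  have h00 : pvAt (pvSet dp0 0 0 0) 0 0 = 0 :=
    pvAt_set_eq _ _ _ _ (by omega) (by rw [hdR 0 (by omega)]; omega)
  obtain ⟨rL, rR, rv, ru⟩ := rowA nums1 nums2 (pvSet dp0 0 0 0) h00
    (by omega) (fun a ha => by rw [h1R a, hdR a (by omega)]; omega) nums1.length le_rfl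
  obtain ⟨cL, cR, cv, cu, cz⟩ := colA nums1 nums2 _ (rv 0 (by omega))
    (by omega) (fun a ha => by rw [rR a, h1R a, hdR a (by omega)]; omega) nums2.length le_rfl
  obtain ⟨-, -, mv⟩ := mainA nums1 nums2
    ((List.range nums2.length).foldl (pvColStep nums2)
      ((List.range nums1.length).foldl (pvRowStep nums1) (pvSet dp0 0 0 0)))
    (by omega) (fun a ha => by rw [cR a, rR a, h1R a, hdR a (by omega)]; omega)
    (fun a b ha hb hc => by
      rcases hc with rfl | rfl
      · exact cv b hb
      · rw [cz a]; exact rv a ha)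
    nums1.length le_rfl
  exact mv nums1.length nums2.length le_rfl le_rfl (by omega)

-- ===== VERDICT (by name: the statement is the Claim_ definition above) =====
theorem minLargest_spec : Claim_equal_minLargest := by
  intro nums1 nums2 _
  unfold Spec_minLargest minLargest_alt
  exact minLargest_eq_pvSolve nums1 nums2
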